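-- pv_equiv track=rewrite | github.com/mabar04/Amazing | mazegen/Display/visualizing_maze.py | _path_steps
-- ===== SOURCE A (Python) =====
-- from typing import Any, Dict, Generator, List, Optional, Set, Tuple
--
-- Coord = Tuple[int, int]
--
-- def _path_steps(entry: Coord, path: str) -> List[Tuple[int, int]]:
--     r, c = entry
--     steps: List[Tuple[int, int]] = [(r * 2 + 1, c * 2 + 1)]
--     for d in path:
--         if d == "N":
--             steps.append((r * 2, c * 2 + 1))
--             r -= 1
--         elif d == "S":
--             steps.append((r * 2 + 2, c * 2 + 1))
--             r += 1
--         elif d == "E":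
--             steps.append((r * 2 + 1, c * 2 + 2))
--             c += 1
--         elif d == "W":
--             steps.append((r * 2 + 1, c * 2))
--             c -= 1
--         steps.append((r * 2 + 1, c * 2 + 1))
--     return steps
-- ===== SOURCE B (Python) =====
-- from typing import List, Tuple
--
-- Coord = Tuple[int, int]
--
-- _DELTAS = {"N": (-1, 0), "S": (1, 0), "E": (0, 1), "W": (0, -1)}
--
-- def _path_steps(entry: Coord, path: str) -> List[Tuple[int, int]]:
--     # First pass: cell coordinates after each step (unchanged for unknown chars).
--     r, c = entry
--     cells = [(r * 2 + 1, c * 2 + 1)]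
--     for d in path:
--         dr, dc = _DELTAS.get(d, (0, 0))
--         r += dr
--         c += dc
--         cells.append((r * 2 + 1, c * 2 + 1))
--     # Second pass: interleave wall midpoints between consecutive distinct cells.
--     out = [cells[0]]
--     for prev, cur in zip(cells, cells[1:]):
--         if prev != cur:
--             out.append(((prev[0] + cur[0]) // 2, (prev[1] + cur[1]) // 2))
--         out.append(cur)
--     return out
-- ===== Notes on version B (the rewrite author's own statement) =====
-- stated objective: alternative
-- what changed: B replaces A's single stateful loop with four wall-formula branches by two passes: first build the list of scaled cell coordinates via a direction-delta dict, then interleave integer midpoints between consecutive distinct cells as the walls.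
import Mathlib
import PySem

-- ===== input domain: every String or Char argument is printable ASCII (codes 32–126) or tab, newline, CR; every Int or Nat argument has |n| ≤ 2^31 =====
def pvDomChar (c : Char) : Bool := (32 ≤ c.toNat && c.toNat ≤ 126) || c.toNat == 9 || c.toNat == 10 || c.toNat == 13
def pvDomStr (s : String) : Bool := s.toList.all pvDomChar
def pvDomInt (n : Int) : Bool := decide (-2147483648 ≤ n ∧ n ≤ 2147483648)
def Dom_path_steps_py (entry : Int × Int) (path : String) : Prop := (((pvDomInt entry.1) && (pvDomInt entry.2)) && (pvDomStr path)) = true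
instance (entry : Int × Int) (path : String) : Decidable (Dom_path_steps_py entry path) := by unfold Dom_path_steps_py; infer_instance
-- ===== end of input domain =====

-- B replaces A's single stateful loop (four hand-written wall formulas) by two passes:
-- build the scaled cell list from a direction-delta dict, then interleave integer midpoints
-- between consecutive distinct cells; same return value, no speed claim.

-- ===== PORT A =====
-- A's loop: at each char, maybe append a wall and update (r, c), then append the current cell.
def pathStepsLoopA : List Char → Int → Int → List (Int × Int)
  | [], _, _ => []
  | d :: ds, r, c =>
    if d = 'N' then (r * 2, c * 2 + 1) :: ((r - 1) * 2 + 1, c * 2 + 1) :: pathStepsLoopA ds (r - 1) c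
    else if d = 'S' then (r * 2 + 2, c * 2 + 1) :: ((r + 1) * 2 + 1, c * 2 + 1) :: pathStepsLoopA ds (r + 1) c
    else if d = 'E' then (r * 2 + 1, c * 2 + 2) :: (r * 2 + 1, (c + 1) * 2 + 1) :: pathStepsLoopA ds r (c + 1)
    else if d = 'W' then (r * 2 + 1, c * 2) :: (r * 2 + 1, (c - 1) * 2 + 1) :: pathStepsLoopA ds r (c - 1)
    else (r * 2 + 1, c * 2 + 1) :: pathStepsLoopA ds r c

def path_steps_py (entry : Int × Int) (path : String) : List (Int × Int) :=
  (entry.1 * 2 + 1, entry.2 * 2 + 1) :: pathStepsLoopA path.toList entry.1 entry.2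

-- ===== PORT B =====
def pvDeltas : PySem.Dict Char (Int × Int) :=
  PySem.Dict.ofList [('N', (-1, 0)), ('S', (1, 0)), ('E', (0, 1)), ('W', (0, -1))]

-- First pass of Source B: the scaled cell coordinate after each step.
def pvCellsOf : Int → Int → List Char → List (Int × Int)
  | _, _, [] => []
  | r, c, d :: ds =>
    let drdc := pvDeltas.getD d (0, 0)
    ((r + drdc.1) * 2 + 1, (c + drdc.2) * 2 + 1) :: pvCellsOf (r + drdc.1) (c + drdc.2) ds

-- Second pass of Source B: interleave midpoints ('//' = PySem.Int.floordiv) between distinct cells.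
def pvWeave : (Int × Int) → List (Int × Int) → List (Int × Int)
  | _, [] => []
  | prev, cur :: rest =>
    (if prev ≠ cur
      then [(PySem.Int.floordiv (prev.1 + cur.1) 2, PySem.Int.floordiv (prev.2 + cur.2) 2)]
      else []) ++ cur :: pvWeave cur rest

def path_steps_py_alt (entry : Int × Int) (path : String) : List (Int × Int) :=
  (entry.1 * 2 + 1, entry.2 * 2 + 1) ::
    pvWeave (entry.1 * 2 + 1, entry.2 * 2 + 1) (pvCellsOf entry.1 entry.2 path.toList)

-- ===== PRECONDITION & SPEC =====
def Spec_path_steps_py (entry : Int × Int) (path : String) (out : List (Int × Int)) : Prop := out = path_steps_py_alt entry path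
instance (entry : Int × Int) (path : String) (out : List (Int × Int)) : Decidable (Spec_path_steps_py entry path out) := by unfold Spec_path_steps_py; infer_instance

-- ===== CLAIM (what is proved, stated in full; the proofs are below) =====
def Claim_equal_path_steps_py : Prop := ∀ (entry : Int × Int) (path : String), Dom_path_steps_py entry path → Spec_path_steps_py entry path (path_steps_py entry path)

-- ===== LEMMAS AND PROOFS =====

theorem pv_delta_N : pvDeltas.getD 'N' (0, 0) = (-1, 0) := by decide
theorem pv_delta_S : pvDeltas.getD 'S' (0, 0) = (1, 0) := by decide
theorem pv_delta_E : pvDeltas.getD 'E' (0, 0) = (0, 1) := by decide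
theorem pv_delta_W : pvDeltas.getD 'W' (0, 0) = (0, -1) := by decide

theorem pv_delta_other (d : Char) (h1 : ¬ d = 'N') (h2 : ¬ d = 'S') (h3 : ¬ d = 'E') (h4 : ¬ d = 'W') :
    pvDeltas.getD d (0, 0) = (0, 0) := by
  have e : pvDeltas = PySem.Dict.mk [('N', (-1, 0)), ('S', (1, 0)), ('E', (0, 1)), ('W', (0, -1))] := by
    decide
  rw [e]
  simp [PySem.Dict.getD, PySem.Dict.get?, Ne.symm h1, Ne.symm h2, Ne.symm h3, Ne.symm h4]

theorem pv_loop_eq_weave (ds : List Char) (r c : Int) :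
    pathStepsLoopA ds r c = pvWeave (r * 2 + 1, c * 2 + 1) (pvCellsOf r c ds) := by
  induction ds generalizing r c with
  | nil => rfl
  | cons d ds ih =>
    by_cases h1 : d = 'N'
    · subst h1
      norm_num [pathStepsLoopA, pvCellsOf, pv_delta_N, ← sub_eq_add_neg]
      rw [ih, pvWeave, if_pos (by intro hEq; simp only [Prod.mk.injEq] at hEq; omega)]
      simp only [List.cons_append, List.nil_append, List.cons.injEq, Prod.mk.injEq]
      and_intros <;> first | rfl | trivial | (symm; rw [PySem.Int.floordiv_eq_ediv_of_pos (by omega)]; omega)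
    by_cases h2 : d = 'S'
    · subst h2
      norm_num [pathStepsLoopA, pvCellsOf, pv_delta_S, h1, ← sub_eq_add_neg]
      rw [ih, pvWeave, if_pos (by intro hEq; simp only [Prod.mk.injEq] at hEq; omega)]
      simp only [List.cons_append, List.nil_append, List.cons.injEq, Prod.mk.injEq]
      and_intros <;> first | rfl | trivial | (symm; rw [PySem.Int.floordiv_eq_ediv_of_pos (by omega)]; omega)
    by_cases h3 : d = 'E'
    · subst h3
      norm_num [pathStepsLoopA, pvCellsOf, pv_delta_E, h1, h2, ← sub_eq_add_neg]
      rw [ih, pvWeave, if_pos (by intro hEq; simp only [Prod.mk.injEq] at hEq; omega)]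
      simp only [List.cons_append, List.nil_append, List.cons.injEq, Prod.mk.injEq]
      and_intros <;> first | rfl | trivial | (symm; rw [PySem.Int.floordiv_eq_ediv_of_pos (by omega)]; omega)
    by_cases h4 : d = 'W'
    · subst h4
      norm_num [pathStepsLoopA, pvCellsOf, pv_delta_W, h1, h2, h3, ← sub_eq_add_neg]
      rw [ih, pvWeave, if_pos (by intro hEq; simp only [Prod.mk.injEq] at hEq; omega)]
      simp only [List.cons_append, List.nil_append, List.cons.injEq, Prod.mk.injEq]
      and_intros <;> first | rfl | trivial | (symm; rw [PySem.Int.floordiv_eq_ediv_of_pos (by omega)]; omega)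
    norm_num [pathStepsLoopA, pvCellsOf, pv_delta_other d h1 h2 h3 h4, h1, h2, h3, h4]
    rw [ih, pvWeave, if_neg (by simp)]
    simp

-- ===== VERDICT (by name: the statement is the Claim_ definition above) =====
theorem path_steps_py_spec : Claim_equal_path_steps_py := by
  intro entry path _
  unfold Spec_path_steps_py path_steps_py path_steps_py_alt
  rw [pv_loop_eq_weave]
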